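-- pv_equiv track=rewrite | github.com/flyingtony1424/Lab11.1 | Lab11.py | calculate_assignment_statistics
-- ===== SOURCE A (Python) =====
-- def calculate_assignment_statistics(assignment_id, submissions):
--     scores = [
--         submission['score'] for submission in submissions
--         if submission['assignment_id'] == assignment_id
--     ]
--     if not scores:
--         return None
--     return (
--         int(min(scores)),
--         int(sum(scores) // len(scores)),  # Truncate decimals for average
--         int(max(scores))
--     )
-- ===== SOURCE B (Python) =====
-- def calculate_assignment_statistics(assignment_id, submissions):
--     # Divide and conquer: recursively split the submission list in half,
--     # compute (min, total, max, count) stats of each half, and merge them.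
--     def merge(left, right):
--         if left is None:
--             return right
--         if right is None:
--             return left
--         return (min(left[0], right[0]), left[1] + right[1],
--                 max(left[2], right[2]), left[3] + right[3])
--
--     def stats(subs):
--         if not subs:
--             return None
--         if len(subs) == 1:
--             s = subs[0]
--             if s['assignment_id'] == assignment_id:
--                 sc = s['score']
--                 return (sc, sc, sc, 1)
--             return None
--         mid = len(subs) // 2
--         return merge(stats(subs[:mid]), stats(subs[mid:]))
--
--     r = stats(submissions)
--     if r is None:
--         return None
--     return (int(r[0]), int(r[1] // r[3]), int(r[2]))
-- ===== Notes on version B (the rewrite author's own statement) =====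
-- stated objective: alternative
-- what changed: Replaces the filter-comprehension followed by min/sum/len/max aggregate passes with a divide-and-conquer recursion that splits the list in half and merges (min,total,max,count) stat tuples.
import Mathlib
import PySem

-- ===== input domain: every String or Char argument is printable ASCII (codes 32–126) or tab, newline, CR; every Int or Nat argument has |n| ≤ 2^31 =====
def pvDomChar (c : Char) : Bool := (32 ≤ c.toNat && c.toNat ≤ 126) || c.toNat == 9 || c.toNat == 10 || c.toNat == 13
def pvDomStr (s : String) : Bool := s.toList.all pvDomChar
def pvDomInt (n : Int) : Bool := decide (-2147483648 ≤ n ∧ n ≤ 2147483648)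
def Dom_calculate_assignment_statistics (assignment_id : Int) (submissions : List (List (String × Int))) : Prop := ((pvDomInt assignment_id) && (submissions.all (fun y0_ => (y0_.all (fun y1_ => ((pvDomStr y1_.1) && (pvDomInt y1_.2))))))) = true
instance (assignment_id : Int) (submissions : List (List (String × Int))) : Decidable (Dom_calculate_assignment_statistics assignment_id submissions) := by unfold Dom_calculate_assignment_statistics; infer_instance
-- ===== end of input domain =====

-- B replaces the comprehension plus aggregate passes (min/sum/len/max) with a
-- divide-and-conquer recursion merging (min,total,max,count) stat tuples.

-- ===== PORT A =====
-- dict lookup d[k]; under Pre_ the key is always present, so the default is never used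
def pvGetKey (d : List (String × Int)) (k : String) : Int :=
  ((d.find? (fun p => p.1 == k)).map Prod.snd).getD 0

def calculate_assignment_statistics (assignment_id : Int) (submissions : List (List (String × Int))) : Option (Int × Int × Int) :=
  let scores := submissions.foldl (fun acc s =>
    if pvGetKey s "assignment_id" = assignment_id then acc ++ [pvGetKey s "score"] else acc) []
  if scores = [] then none
  else some ((PySem.List.min? scores (fun x => x)).getD 0,
             PySem.Int.floordiv (scores.foldl (· + ·) 0) (scores.length : Int),
             (PySem.List.max? scores (fun x => x)).getD 0)

-- ===== PORT B =====
-- merge of two optional (min, total, max, count) stat tuples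
def pvMerge (l r : Option (Int × Int × Int × Int)) : Option (Int × Int × Int × Int) :=
  match l, r with
  | none, r => r
  | l, none => l
  | some (a1, s1, b1, c1), some (a2, s2, b2, c2) =>
      some (min a1 a2, s1 + s2, max b1 b2, c1 + c2)

def pvStats (aid : Int) (subs : List (List (String × Int))) : Option (Int × Int × Int × Int) :=
  match subs with
  | [] => none
  | [s] =>
      if pvGetKey s "assignment_id" = aid then
        let sc := pvGetKey s "score"
        some (sc, sc, sc, 1)
      else none
  | s1 :: s2 :: rest =>
      let l := s1 :: s2 :: rest
      let mid := l.length / 2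
      pvMerge (pvStats aid (l.take mid)) (pvStats aid (l.drop mid))
termination_by subs.length
decreasing_by
  · simp only [List.length_take, List.length_cons]; omega
  · simp only [List.length_drop, List.length_cons]; omega

def calculate_assignment_statistics_alt (assignment_id : Int) (submissions : List (List (String × Int))) : Option (Int × Int × Int) :=
  match pvStats assignment_id submissions with
  | none => none
  | some (lo, tot, hi, cnt) => some (lo, PySem.Int.floordiv tot cnt, hi)

-- ===== PRECONDITION & SPEC =====
-- Pre_ excludes exactly the inputs where Python A raises KeyError: a submission without
-- an 'assignment_id' key, or a matching submission without a 'score' key.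
def Pre_calculate_assignment_statistics (assignment_id : Int) (submissions : List (List (String × Int))) : Prop :=
  ∀ s ∈ submissions, (s.find? (fun p => p.1 == "assignment_id")).isSome = true ∧
    ((s.find? (fun p => p.1 == "assignment_id")).map Prod.snd = some assignment_id → (s.find? (fun p => p.1 == "score")).isSome = true)
instance (assignment_id : Int) (submissions : List (List (String × Int))) : Decidable (Pre_calculate_assignment_statistics assignment_id submissions) := by unfold Pre_calculate_assignment_statistics; infer_instance

def pvWitness_calculate_assignment_statistics : Int × (List (List (String × Int))) :=
  (1, [[("assignment_id", 1), ("score", 5)], [("assignment_id", 2)]])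

def Spec_calculate_assignment_statistics (assignment_id : Int) (submissions : List (List (String × Int))) (out : Option (Int × Int × Int)) : Prop := out = calculate_assignment_statistics_alt assignment_id submissions
instance (assignment_id : Int) (submissions : List (List (String × Int))) (out : Option (Int × Int × Int)) : Decidable (Spec_calculate_assignment_statistics assignment_id submissions out) := by unfold Spec_calculate_assignment_statistics; infer_instance

-- ===== CLAIM =====
def Claim_equal_calculate_assignment_statistics : Prop := ∀ (assignment_id : Int) (submissions : List (List (String × Int))), Dom_calculate_assignment_statistics assignment_id submissions → Pre_calculate_assignment_statistics assignment_id submissions → Spec_calculate_assignment_statistics assignment_id submissions (calculate_assignment_statistics assignment_id submissions)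

-- ===== LEMMAS AND PROOFS =====

-- the scores list both programs conceptually aggregate
def pvScores (aid : Int) (subs : List (List (String × Int))) : List Int :=
  subs.filterMap (fun s => if pvGetKey s "assignment_id" = aid then some (pvGetKey s "score") else none)

-- the stats of a score list, as aggregates
def pvSpecStats : List Int → Option (Int × Int × Int × Int)
  | [] => none
  | x :: t => some (t.foldl min x, (x :: t).foldl (· + ·) 0, t.foldl max x, (t.length : Int) + 1)

theorem pvFoldA_eq (aid : Int) (subs : List (List (String × Int))) :
    ∀ acc : List Int,
      subs.foldl (fun acc s =>
        if pvGetKey s "assignment_id" = aid then acc ++ [pvGetKey s "score"] else acc) acc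
      = acc ++ pvScores aid subs := by
  induction subs with
  | nil => intro acc; simp [pvScores]
  | cons s rest ih =>
    intro acc
    simp only [List.foldl_cons, pvScores, List.filterMap_cons]
    by_cases h : pvGetKey s "assignment_id" = aid
    · simp [h, ih, pvScores]
    · simp [h, ih, pvScores]

theorem foldl_min_comm (l : List Int) (a b : Int) :
    l.foldl min (min a b) = min a (l.foldl min b) := by
  induction l generalizing b with
  | nil => rfl
  | cons x t ih => simp only [List.foldl_cons, min_assoc, ih]

theorem foldl_max_comm (l : List Int) (a b : Int) :
    l.foldl max (max a b) = max a (l.foldl max b) := by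
  induction l generalizing b with
  | nil => rfl
  | cons x t ih => simp only [List.foldl_cons, max_assoc, ih]

theorem foldl_add_init (l : List Int) (a : Int) :
    l.foldl (· + ·) a = a + l.foldl (· + ·) 0 := by
  induction l generalizing a with
  | nil => simp
  | cons x t ih =>
    simp only [List.foldl_cons]
    rw [ih (a + x), ih (0 + x)]
    ring

theorem pvMerge_spec (a b : List Int) :
    pvMerge (pvSpecStats a) (pvSpecStats b) = pvSpecStats (a ++ b) := by
  cases a with
  | nil => simp [pvSpecStats, pvMerge]
  | cons x t =>
    cases b with
    | nil => simp [pvSpecStats, pvMerge]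
    | cons y u =>
      simp only [pvSpecStats, pvMerge, List.cons_append, List.foldl_cons, List.foldl_append,
        List.length_append, List.length_cons, Option.some.injEq, Prod.mk.injEq]
      refine ⟨?_, ?_, ?_, by push_cast; ring⟩
      · rw [← foldl_min_comm u (t.foldl min x) y]
      · rw [foldl_add_init u (List.foldl (· + ·) (0 + x) t + y), foldl_add_init u (0 + y)]
        ring
      · rw [← foldl_max_comm u (t.foldl max x) y]

theorem pvScores_append (aid : Int) (l1 l2 : List (List (String × Int))) :
    pvScores aid (l1 ++ l2) = pvScores aid l1 ++ pvScores aid l2 := by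
  simp [pvScores]

theorem pvStats_eq (aid : Int) (subs : List (List (String × Int))) :
    pvStats aid subs = pvSpecStats (pvScores aid subs) := by
  induction subs using pvStats.induct aid with
  | case1 => rw [pvStats]; rfl
  | case2 s h => simp [pvStats, pvScores, pvSpecStats, h]
  | case3 s h => simp [pvStats, pvScores, pvSpecStats, h]
  | case4 s1 s2 rest l mid ih1 ih2 =>
    rw [pvStats]
    rw [ih1, ih2, pvMerge_spec, ← pvScores_append, List.take_append_drop]

-- ===== VERDICT =====
theorem calculate_assignment_statistics_spec : Claim_equal_calculate_assignment_statistics := by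
  intro assignment_id submissions _ _
  unfold Spec_calculate_assignment_statistics
  unfold calculate_assignment_statistics calculate_assignment_statistics_alt
  rw [pvStats_eq, pvFoldA_eq assignment_id submissions []]
  simp only [List.nil_append]
  cases h : pvScores assignment_id submissions with
  | nil => simp [pvSpecStats]
  | cons x t =>
    simp only [pvSpecStats, List.foldl_cons]
    have hne : (x :: t) ≠ ([] : List Int) := by simp
    simp only [if_neg hne]
    simp [PySem.List.min?_id_cons, PySem.List.max?_id_cons, List.length_cons]
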